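-- pv_equiv track=rewrite | github.com/reno99986/praktik-alpro | soal5week9.py | fungsi
-- ===== SOURCE A (Python) =====
-- def fungsi(a,b):
--     jum = 0
--     jab = ""
--     while a <= b:
--         if a % 2 == 0:
--             if a <= b-2:
--                 jab += f"{a}+"
--                 jum+=a
--                 a += 2
--             else:
--                 jab += f"{a}="
--                 jum+=a
--                 a += 2
--         else:
--             a += 1
--     semua=jab+str(jum)
--     return(semua)
-- ===== SOURCE B (Python) =====
-- def fungsi(a, b):
--     lo = a + a % 2          # first even in [a, b]
--     hi = b - b % 2          # last even in [a, b]
--     if lo > hi: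
--         return "0"
--     n = (hi - lo) // 2 + 1
--     total = (lo + hi) * n // 2
--     return "+".join(map(str, range(lo, hi + 1, 2))) + "=" + str(total)
-- ===== Notes on version B (the rewrite author's own statement) =====
-- stated objective: alternative
-- what changed: Instead of scanning every integer with a parity test, a running sum and an inline last-element '+'/'=' decision appended by repeated string concatenation, B computes the even endpoints lo/hi arithmetically, gets the total from the arithmetic-series closed form (lo+hi)*n//2 with no summation loop, and renders the stride-2 range with a single str.join plus a trailing '='.
import Mathlib
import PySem

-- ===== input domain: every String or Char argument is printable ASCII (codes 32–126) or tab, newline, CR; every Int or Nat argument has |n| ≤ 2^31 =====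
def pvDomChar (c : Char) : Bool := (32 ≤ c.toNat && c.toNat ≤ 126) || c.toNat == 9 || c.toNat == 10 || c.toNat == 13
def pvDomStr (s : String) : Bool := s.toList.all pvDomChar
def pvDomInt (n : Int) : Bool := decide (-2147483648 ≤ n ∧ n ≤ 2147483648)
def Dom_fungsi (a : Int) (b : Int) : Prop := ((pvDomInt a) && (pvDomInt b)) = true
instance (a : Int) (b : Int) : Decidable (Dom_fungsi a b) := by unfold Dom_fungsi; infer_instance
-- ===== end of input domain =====

-- B computes the even endpoints arithmetically, takes the total from the
-- arithmetic-series closed form (no summation loop), and renders the stride-2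
-- range with join + trailing '='; A scans every integer with a running sum.

-- ===== PORT A =====
-- the while loop of A: state (a, jum, jab); fuel = (b + 1 - a).toNat bounds the
-- number of iterations (a grows by at least 1 each pass), so the 0-fuel case is never
-- reached with a ≤ b and the loop's semantics are exactly A's
def fungsiLoop (fuel : Nat) (a : Int) (b : Int) (jum : Int) (jab : String) : String :=
  match fuel with
  | 0 => jab ++ PySem.Int.toStr jum
  | fuel + 1 =>
    if a ≤ b then
      if PySem.Int.mod a 2 = 0 then
        if a ≤ b - 2 then
          fungsiLoop fuel (a + 2) b (jum + a) (jab ++ PySem.Int.toStr a ++ "+")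
        else
          fungsiLoop fuel (a + 2) b (jum + a) (jab ++ PySem.Int.toStr a ++ "=")
      else
        fungsiLoop fuel (a + 1) b jum jab
    else
      jab ++ PySem.Int.toStr jum

def fungsi (a : Int) (b : Int) : String :=
  fungsiLoop (b + 1 - a).toNat a b 0 ""

-- ===== PORT B =====
def fungsi_alt (a : Int) (b : Int) : String :=
  let lo := a + PySem.Int.mod a 2
  let hi := b - PySem.Int.mod b 2
  if lo > hi then "0"
  else
    let n := PySem.Int.floordiv (hi - lo) 2 + 1
    let total := PySem.Int.floordiv ((lo + hi) * n) 2
    PySem.Str.join "+" ((PySem.List.pyRange lo (hi + 1) 2).map PySem.Int.toStr)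
      ++ "=" ++ PySem.Int.toStr total

-- ===== PRECONDITION & SPEC =====
def Spec_fungsi (a : Int) (b : Int) (out : String) : Prop := out = fungsi_alt a b
instance (a : Int) (b : Int) (out : String) : Decidable (Spec_fungsi a b out) := by unfold Spec_fungsi; infer_instance

-- ===== CLAIM (what is proved, stated in full; the proofs are below) =====
def Claim_equal_fungsi : Prop := ∀ (a : Int) (b : Int), Dom_fungsi a b → Spec_fungsi a b (fungsi a b)

-- ===== LEMMAS AND PROOFS =====

-- the evens of [a, b], in order (A's iteration visits exactly these)
def pvE (a : Int) (b : Int) : List Int :=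
  (PySem.List.pyRange a (b + 1) 1).filter (fun x => PySem.Int.mod x 2 == 0)

lemma pvE_nil {a b : Int} (h : b < a) : pvE a b = [] := by
  simp [pvE, PySem.List.pyRange_one_eq_nil (by omega : b + 1 ≤ a)]

lemma pvE_cons_even {a b : Int} (h : a ≤ b) (he : PySem.Int.mod a 2 = 0) :
    pvE a b = a :: pvE (a + 1) b := by
  have hd : 2 ∣ a := (PySem.Int.mod_eq_zero_iff_dvd a 2).mp he
  simp [pvE, PySem.List.pyRange_one_cons (by omega : a < b + 1),
    show a % 2 = 0 by omega]

lemma pvE_cons_odd {a b : Int} (h : a ≤ b) (he : ¬ PySem.Int.mod a 2 = 0) :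
    pvE a b = pvE (a + 1) b := by
  have hd : ¬ 2 ∣ a := fun hh => he ((PySem.Int.mod_eq_zero_iff_dvd a 2).mpr hh)
  simp [pvE, PySem.List.pyRange_one_cons (by omega : a < b + 1),
    show ¬ a % 2 = 0 by omega]

lemma pvE_skip_odd {a b : Int} (he : PySem.Int.mod a 2 = 0) :
    pvE (a + 1) b = pvE (a + 2) b := by
  by_cases h : a + 1 ≤ b
  · have h2 : 2 ∣ a := (PySem.Int.mod_eq_zero_iff_dvd a 2).mp he
    have ho : ¬ PySem.Int.mod (a + 1) 2 = 0 := by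
      rw [PySem.Int.mod_eq_zero_iff_dvd]; omega
    have := pvE_cons_odd h ho
    rwa [show a + 1 + 1 = a + 2 by ring] at this
  · rw [pvE_nil (by omega), pvE_nil (by omega)]

lemma pvE_ne_nil {a b : Int} (h : a ≤ b) (he : PySem.Int.mod a 2 = 0) :
    pvE a b ≠ [] := by
  rw [pvE_cons_even h he]; simp

lemma plus_toList : "+".toList = ['+'] := rfl

-- A's loop, characterised over the list of evens (on the List Char level)
lemma fungsiLoop_toList (n : Nat) : ∀ (a b jum : Int) (jab : String), (b + 1 - a).toNat ≤ n →
    (fungsiLoop n a b jum jab).toList =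
      jab.toList
        ++ (if pvE a b = [] then []
            else PySem.Chars.join "+".toList ((pvE a b).map PySem.Int.toChars) ++ ['='])
        ++ PySem.Int.toChars ((pvE a b).foldl (· + ·) jum) := by
  induction n with
  | zero =>
    intro a b jum jab hn
    have hb : b < a := by omega
    simp [fungsiLoop, pvE_nil hb]
  | succ n ih =>
    intro a b jum jab hn
    rw [fungsiLoop]
    by_cases h : a ≤ b
    · simp only [if_pos h]
      by_cases he : PySem.Int.mod a 2 = 0
      · simp only [if_pos he]
        rw [pvE_cons_even h he, pvE_skip_odd he]
        by_cases h2 : a ≤ b - 2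
        · simp only [if_pos h2]
          rw [ih _ _ _ _ (by omega)]
          have hne : pvE (a + 2) b ≠ [] := pvE_ne_nil (by omega) (by
            rw [PySem.Int.mod_eq_zero_iff_dvd] at he ⊢; omega)
          obtain ⟨y, ys, hy⟩ := List.exists_cons_of_ne_nil hne
          simp only [hy, List.map_cons]
          rw [PySem.Chars.join_cons_cons, plus_toList]
          simp [PySem.Int.toList_toStr, List.foldl]
        · simp only [if_neg h2]
          rw [ih _ _ _ _ (by omega)]
          rw [pvE_nil (show b < a + 2 by omega)]
          simp only [List.map_cons, List.map_nil, PySem.Chars.join_singleton]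
          simp [PySem.Int.toList_toStr, List.foldl]
      · simp only [if_neg he]
        rw [pvE_cons_odd h he, ih _ _ _ _ (by omega)]
    · simp [if_neg h, pvE_nil (by omega : b < a)]

-- stride-2 range: induction forms
lemma pyRange_two_nil {lo c : Int} (h : c ≤ lo) : PySem.List.pyRange lo c 2 = [] := by
  rw [PySem.List.pyRange_of_pos _ _ (by norm_num : (0:Int) < 2)]
  simp [show ¬ lo < c by omega]

lemma pyRange_two_cons {lo c : Int} (h : lo < c) :
    PySem.List.pyRange lo c 2 = lo :: PySem.List.pyRange (lo + 2) c 2 := by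
  rw [PySem.List.pyRange_of_pos _ _ (by norm_num : (0:Int) < 2),
      PySem.List.pyRange_of_pos _ _ (by norm_num : (0:Int) < 2)]
  have hN : (if lo < c then ((c - lo + 2 - 1) / 2).toNat else 0)
      = (if lo + 2 < c then ((c - (lo + 2) + 2 - 1) / 2).toNat else 0) + 1 := by
    by_cases h2 : lo + 2 < c
    · simp only [if_pos h, if_pos h2]; omega
    · simp only [if_pos h, if_neg h2]; omega
  rw [hN, List.range_succ_eq_map, List.map_cons, List.map_map]
  congr 1
  · omega
  · apply List.map_congr_left
    intro k _
    simp [Function.comp]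
    push_cast
    ring

-- the evens of [a, b] ARE the stride-2 range from the first even to the last
lemma pvE_eq_pyRange_two (n : Nat) : ∀ (a b : Int), (b + 1 - a).toNat ≤ n →
    pvE a b = PySem.List.pyRange (a + PySem.Int.mod a 2) (b - PySem.Int.mod b 2 + 1) 2 := by
  induction n with
  | zero =>
    intro a b hn
    have hb : b < a := by omega
    have ha := PySem.Int.mod_two_eq a
    have hbm := PySem.Int.mod_two_eq b
    rw [pvE_nil hb, pyRange_two_nil (by omega)]
  | succ n ih =>
    intro a b hn
    by_cases h : a ≤ b
    · have hd2 : ∀ x : Int, PySem.Int.mod x 2 = 0 ↔ 2 ∣ x := fun x =>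
        PySem.Int.mod_eq_zero_iff_dvd x 2
      by_cases he : PySem.Int.mod a 2 = 0
      · have hda : 2 ∣ a := (hd2 a).mp he
        have hbm := PySem.Int.mod_two_eq b
        have hdb : 2 ∣ (b - PySem.Int.mod b 2) := by
          rcases hbm with hb0 | hb1
          · exact (hd2 b).mp hb0 |>.sub (hb0 ▸ dvd_zero 2)
          · rw [hb1]
            have : ¬ 2 ∣ b := by
              intro hdvd
              have := (hd2 b).mpr hdvd
              omega
            omega
        have hlohi : a ≤ b - PySem.Int.mod b 2 := by
          rcases hbm with hb0 | hb1
          · omega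
          · have : a ≠ b := by
              intro hab; rw [hab] at he; omega
            omega
        rw [pvE_cons_even h he, pvE_skip_odd he, he]
        rw [pyRange_two_cons (by omega), show a + 0 = a from by ring]
        have hm2 : PySem.Int.mod (a + 2) 2 = 0 := (hd2 _).mpr (by omega)
        have := ih (a + 2) b (by omega)
        rw [hm2] at this
        rw [show a + 2 + 0 = a + 2 from by ring] at this
        rw [this]
      · have ho : PySem.Int.mod a 2 = 1 := by
          rcases PySem.Int.mod_two_eq a with h0 | h1
          · exact absurd h0 he
          · exact h1
        rw [pvE_cons_odd h he, ho]
        have hm1 : PySem.Int.mod (a + 1) 2 = 0 := by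
          rw [PySem.Int.mod_eq_zero_iff_dvd]
          have : ¬ 2 ∣ a := fun hh => he ((PySem.Int.mod_eq_zero_iff_dvd a 2).mpr hh)
          omega
        have := ih (a + 1) b (by omega)
        rw [hm1, show a + 1 + 0 = a + 1 from by ring] at this
        rw [this]
    · have ha := PySem.Int.mod_two_eq a
      have hbm := PySem.Int.mod_two_eq b
      rw [pvE_nil (by omega), pyRange_two_nil (by omega)]

lemma foldl_add_eq_sum (l : List Int) : ∀ c : Int, l.foldl (· + ·) c = c + l.sum := by
  induction l with
  | nil => intro c; simp
  | cons x xs ih => intro c; simp [List.foldl, ih, List.sum_cons]; ring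

-- Gauss: the sum of the stride-2 range lo, lo+2, …, lo+2m
lemma sum_pyRange_two (m : Nat) : ∀ lo : Int,
    (PySem.List.pyRange lo (lo + 2 * m + 1) 2).sum = (m + 1) * lo + m * (m + 1) := by
  induction m with
  | zero =>
    intro lo
    rw [show lo + 2 * (0:Nat) + 1 = lo + 1 by norm_num]
    rw [pyRange_two_cons (by omega), pyRange_two_nil (by omega)]
    push_cast; simp
  | succ m ih =>
    intro lo
    rw [pyRange_two_cons (by push_cast; omega), List.sum_cons]
    have := ih (lo + 2)
    rw [show lo + 2 + 2 * (m:Int) + 1 = lo + 2 * ((m:Int) + 1) + 1 by ring] at this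
    rw [show lo + 2 * ((m + 1 : Nat):Int) + 1 = lo + 2 * ((m:Int) + 1) + 1 by push_cast; ring,
        this]
    push_cast; ring

theorem fungsi_eq_alt (a b : Int) : fungsi a b = fungsi_alt a b := by
  apply String.toList_injective
  have h := fungsiLoop_toList ((b + 1 - a).toNat) a b 0 "" le_rfl
  rw [show fungsi a b = fungsiLoop (b + 1 - a).toNat a b 0 "" from rfl, h]
  have hE := pvE_eq_pyRange_two ((b + 1 - a).toNat) a b le_rfl
  set lo := a + PySem.Int.mod a 2 with hlo
  set hi := b - PySem.Int.mod b 2 with hhi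
  by_cases hle : lo > hi
  · have hnil : pvE a b = [] := by rw [hE]; exact pyRange_two_nil (by omega)
    rw [fungsi_alt]
    simp only [← hlo, ← hhi, if_pos hle]
    simp [hnil, PySem.Int.toChars]
  · -- nonempty case
    replace hle : lo ≤ hi := by omega
    have ha := PySem.Int.mod_two_eq a
    have hbm := PySem.Int.mod_two_eq b
    have hda : 2 ∣ lo := by
      rw [hlo]
      rcases ha with h0 | h1
      · rw [h0]; have := (PySem.Int.mod_eq_zero_iff_dvd a 2).mp h0; omega
      · rw [h1]
        have : ¬ 2 ∣ a := by
          intro hd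
          have := (PySem.Int.mod_eq_zero_iff_dvd a 2).mpr hd
          omega
        omega
    have hdb : 2 ∣ hi := by
      rw [hhi]
      rcases hbm with h0 | h1
      · rw [h0]; have := (PySem.Int.mod_eq_zero_iff_dvd b 2).mp h0; omega
      · rw [h1]
        have : ¬ 2 ∣ b := by
          intro hd
          have := (PySem.Int.mod_eq_zero_iff_dvd b 2).mpr hd
          omega
        omega
    obtain ⟨m, hm⟩ : ∃ m : Nat, hi = lo + 2 * m := by
      refine ⟨((hi - lo) / 2).toNat, ?_⟩; omega
    have hne : pvE a b ≠ [] := by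
      rw [hE, hm, show lo + 2 * (m:Int) + 1 = lo + 2 * (m:Int) + 1 from rfl,
        pyRange_two_cons (by omega)]
      simp
    have hsum : (pvE a b).foldl (· + ·) (0:Int) = (m + 1) * lo + m * (m + 1) := by
      rw [foldl_add_eq_sum, hE, hm, sum_pyRange_two m lo]; ring
    have hn : PySem.Int.floordiv (hi - lo) 2 + 1 = (m:Int) + 1 := by
      rw [PySem.Int.floordiv_eq_ediv_of_pos (by norm_num)]; omega
    have htot : PySem.Int.floordiv ((lo + hi) * (PySem.Int.floordiv (hi - lo) 2 + 1)) 2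
        = (m + 1) * lo + m * (m + 1) := by
      rw [hn, PySem.Int.floordiv_eq_ediv_of_pos (by norm_num), hm]
      have : (lo + (lo + 2 * (m:Int))) * ((m:Int) + 1) = 2 * (((m:Int) + 1) * lo + m * (m + 1)) := by
        ring
      rw [this]; omega
    rw [fungsi_alt]
    simp only [← hlo, ← hhi, if_neg (by omega : ¬ lo > hi)]
    simp only [if_neg hne, hsum]
    rw [htot, ← hE]
    simp [String.toList_append, PySem.Str.toList_join, List.map_map,
      Function.comp_def, PySem.Int.toList_toStr]

-- ===== VERDICT (by name: the statement is the Claim_ definition above) =====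
theorem fungsi_spec : Claim_equal_fungsi := by
  intro a b _
  exact fungsi_eq_alt a b
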